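-- pv_equiv track=rewrite | github.com/slybootslion/LeetCodeExercise | Python3/151.翻转字符串里的单词.py | trim_spaces_str_to_list
-- ===== SOURCE A (Python) =====
-- def trim_spaces_str_to_list(s):
--     p1, p2 = 0, len(s) - 1
--     while p1 <= p2 and s[p1] == ' ':
--         p1 += 1
--     while p1 <= p2 and s[p2] == ' ':
--         p2 -= 1
--
--     res = []
--     while p1 <= p2:
--         if s[p1] != ' ':
--             res.append(s[p1])
--         elif res[-1] != ' ':
--             res.append(s[p1])
--         p1 += 1
--     return res
-- ===== SOURCE B (Python) =====
-- def trim_spaces_str_to_list(s):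
--     return list(' '.join(w for w in s.split(' ') if w))
-- ===== Notes on version B (the rewrite author's own statement) =====
-- stated objective: idiomatic
-- what changed: Replaces the two-pointer trim plus char-by-char squeeze loop with a split-filter-join pipeline: split on single spaces, drop the empty tokens, rejoin with one space and listify.
import Mathlib
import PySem

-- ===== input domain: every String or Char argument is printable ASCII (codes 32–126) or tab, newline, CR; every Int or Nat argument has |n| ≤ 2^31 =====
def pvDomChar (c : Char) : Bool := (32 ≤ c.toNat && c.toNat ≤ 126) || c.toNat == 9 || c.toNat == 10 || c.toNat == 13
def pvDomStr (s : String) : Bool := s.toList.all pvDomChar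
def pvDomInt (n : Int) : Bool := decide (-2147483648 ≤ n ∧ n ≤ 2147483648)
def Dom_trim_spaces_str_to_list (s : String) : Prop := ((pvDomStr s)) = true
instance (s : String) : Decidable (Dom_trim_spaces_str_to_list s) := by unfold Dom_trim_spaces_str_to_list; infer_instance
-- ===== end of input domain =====

-- B replaces the two-pointer trim plus char-by-char squeeze loop with a split-filter-join
-- pipeline (split on single spaces, drop empty tokens, rejoin with one space, listify).

-- ===== PORT A =====
-- while p1 <= p2 and s[p1] == ' ': p1 += 1
def pvSkipL (cs : List Char) (p1 p2 : Int) : Int :=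
  if p1 ≤ p2 ∧ PySem.List.pyGet? cs p1 = some ' ' then pvSkipL cs (p1 + 1) p2 else p1
termination_by (p2 + 1 - p1).toNat
decreasing_by omega

-- while p1 <= p2 and s[p2] == ' ': p2 -= 1
def pvSkipR (cs : List Char) (p1 p2 : Int) : Int :=
  if p1 ≤ p2 ∧ PySem.List.pyGet? cs p2 = some ' ' then pvSkipR cs p1 (p2 - 1) else p2
termination_by (p2 + 1 - p1).toNat
decreasing_by omega

-- the collecting while-loop; `s[p1]` is always in range here (p1 ∈ [0, len)), so `.getD ' '`
-- is never the default, and `res[-1]` is only read when res is nonempty (the first kept char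
-- is a non-space), so its `.getD ' '` default is never the result either (Python raises there).
def pvCollect (cs : List Char) (p1 p2 : Int) (res : List Char) : List Char :=
  if p1 ≤ p2 then
    pvCollect cs (p1 + 1) p2
      (if (PySem.List.pyGet? cs p1).getD ' ' ≠ ' ' then
        res ++ [(PySem.List.pyGet? cs p1).getD ' ']
      else if (PySem.List.pyGet? res (-1)).getD ' ' ≠ ' ' then
        res ++ [(PySem.List.pyGet? cs p1).getD ' ']
      else res)
  else res
termination_by (p2 + 1 - p1).toNat
decreasing_by omega

-- Python's res is a list of 1-character strings; we keep the chars and wrap at the return.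
def trim_spaces_str_to_list (s : String) : List String :=
  let cs := s.toList
  let p1 := pvSkipL cs 0 ((cs.length : Int) - 1)
  let p2 := pvSkipR cs p1 ((cs.length : Int) - 1)
  (pvCollect cs p1 p2 []).map (fun c => String.mk [c])

-- ===== PORT B =====
-- return list(' '.join(w for w in s.split(' ') if w))
def trim_spaces_str_to_list_alt (s : String) : List String :=
  let toks := PySem.Chars.splitOn s.toList [' ']
  (PySem.Chars.join [' '] (toks.filter (fun w => !w.isEmpty))).map (fun c => String.mk [c])

-- ===== PRECONDITION & SPEC =====
def Spec_trim_spaces_str_to_list (s : String) (out : List String) : Prop := out = trim_spaces_str_to_list_alt s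
instance (s : String) (out : List String) : Decidable (Spec_trim_spaces_str_to_list s out) := by unfold Spec_trim_spaces_str_to_list; infer_instance

-- ===== CLAIM (what is proved, stated in full; the proofs are below) =====
def Claim_equal_trim_spaces_str_to_list : Prop := ∀ (s : String), Dom_trim_spaces_str_to_list s → Spec_trim_spaces_str_to_list s (trim_spaces_str_to_list s)

-- ===== LEMMAS AND PROOFS =====

-- proof-only predicate "is not a space"
def pvNS (c : Char) : Bool := c != ' '

theorem pvNS_true {c : Char} (h : c ≠ ' ') : pvNS c = true := by simp [pvNS, h]
theorem pvNS_space : pvNS ' ' = false := rfl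
theorem pvNS_eq_false {c : Char} : pvNS c = false ↔ c = ' ' := by simp [pvNS]

-- reference word decomposition of a character list
def pvWords (m : List Char) : List (List Char) :=
  match m with
  | [] => []
  | c :: t =>
    if c = ' ' then pvWords t
    else (c :: t.takeWhile pvNS) :: pvWords (t.dropWhile pvNS)
termination_by m.length
decreasing_by
  · simp only [List.length_cons]; omega
  · have := List.length_dropWhile_le pvNS t
    simp only [List.length_cons]
    omega

-- squeeze with a "last kept char is a non-space" flag
def pvSqueezeF (m : List Char) (b : Bool) : List Char :=
  match m with
  | [] => []
  | c :: t =>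
    if c ≠ ' ' then c :: pvSqueezeF t true
    else if b then ' ' :: pvSqueezeF t false
    else pvSqueezeF t false

-- the collect loop body as a structural recursion on the index window
def pvSqueezeAux (m : List Char) (res : List Char) : List Char :=
  match m with
  | [] => res
  | c :: t =>
    pvSqueezeAux t
      (if c ≠ ' ' then res ++ [c]
       else if (PySem.List.pyGet? res (-1)).getD ' ' ≠ ' ' then res ++ [c] else res)

theorem pv_getLast?_cons (c : Char) (l : List Char) (h : l ≠ []) :
    (c :: l).getLast? = l.getLast? := by
  rw [show (c :: l) = [c] ++ l from rfl, List.getLast?_append]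
  rcases l with _ | ⟨d, u⟩
  · exact absurd rfl h
  · rcases e : (d :: u).getLast? with _ | x
    · simp at e
    · simp

theorem pv_getLast?_drop (l : List Char) (k : Nat) (h : k < l.length) :
    (l.drop k).getLast? = l.getLast? := by
  rw [List.getLast?_eq_getElem?, List.getLast?_eq_getElem?, List.getElem?_drop, List.length_drop]
  congr 1
  omega

theorem pv_takeWhile_all (p : Char → Bool) (w r : List Char) (h : ∀ x ∈ w, p x = true) :
    List.takeWhile p (w ++ r) = w ++ List.takeWhile p r := by
  induction w with
  | nil => simp
  | cons c u ih =>
    have hc := h c (by simp)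
    simp only [List.cons_append, List.takeWhile_cons, hc, if_true]
    rw [ih (fun x hx => h x (by simp [hx]))]

theorem pv_dropWhile_all (p : Char → Bool) (w r : List Char) (h : ∀ x ∈ w, p x = true) :
    List.dropWhile p (w ++ r) = List.dropWhile p r := by
  induction w with
  | nil => simp
  | cons c u ih =>
    have hc := h c (by simp)
    simp only [List.cons_append, List.dropWhile_cons, hc, if_true]
    exact ih (fun x hx => h x (by simp [hx]))

theorem pv_takeWhile_append_stop (p : Char → Bool) (u r : List Char) (h : u.dropWhile p ≠ []) :
    (u ++ r).takeWhile p = u.takeWhile p ∧ (u ++ r).dropWhile p = u.dropWhile p ++ r := by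
  induction u with
  | nil => simp at h
  | cons c v ih =>
    cases hpc : p c
    · simp [hpc]
    · have h' : v.dropWhile p ≠ [] := by
        simpa [List.dropWhile_cons, hpc] using h
      obtain ⟨h1, h2⟩ := ih h'
      simp [hpc, h1, h2]

theorem pv_dropWhile_head (p : Char → Bool) (l : List Char) (d : Char) (u : List Char)
    (e : l.dropWhile p = d :: u) : p d = false := by
  induction l with
  | nil => simp at e
  | cons c v ih =>
    rw [List.dropWhile_cons] at e
    by_cases hpc : p c = true
    · rw [if_pos hpc] at e
      exact ih e
    · rw [if_neg hpc] at e
      obtain ⟨h1, -⟩ := List.cons.inj e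
      rw [← h1]
      simpa using hpc

theorem pv_intercalate_cons₂ (sep x y : List Char) (l : List (List Char)) :
    List.intercalate sep (x :: y :: l) = x ++ sep ++ List.intercalate sep (y :: l) := by
  simp [List.intercalate, List.intersperse]

theorem pv_pyGet?_concat_neg_one (res : List Char) (c : Char) :
    PySem.List.pyGet? (res ++ [c]) (-1) = some c := by
  simp [PySem.List.pyGet?, PySem.List.pyIdx?]

theorem pv_modifyHead_nil_append (l : List (List Char)) :
    List.modifyHead (fun x => [] ++ x) l = l := by
  cases l <;> simp

theorem pv_modifyHead_id (l : List (List Char)) :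
    List.modifyHead (fun x => x) l = l := by
  cases l <;> rfl

theorem pv_skipL_eq (cs : List Char) :
    ∀ (d : List Char) (k : Nat), cs.drop k = d →
      pvSkipL cs (k : Int) ((cs.length : Int) - 1)
        = (k : Int) + ((d.takeWhile (· == ' ')).length : Int) := by
  intro d
  induction d with
  | nil =>
    intro k hk
    have hlen : cs.length ≤ k := List.drop_eq_nil_iff.mp hk
    rw [pvSkipL]
    have hng : ¬((k : Int) ≤ (cs.length : Int) - 1) := by omega
    simp [hng]
  | cons c t ih =>
    intro k hk
    have hklen : k < cs.length := by
      by_contra hge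
      rw [List.drop_eq_nil_iff.mpr (by omega)] at hk
      simp at hk
    have hget : PySem.List.pyGet? cs (k : Int) = some c := by
      rw [PySem.List.pyGet?_natCast]
      have h0 : (cs.drop k)[0]? = some c := by rw [hk]; rfl
      rwa [List.getElem?_drop, Nat.add_zero] at h0
    have hk1 : cs.drop (k + 1) = t := by
      rw [← List.drop_drop, hk]; rfl
    rw [pvSkipL]
    by_cases hc : c = ' '
    · subst hc
      have hcond : (k : Int) ≤ (cs.length : Int) - 1 ∧ PySem.List.pyGet? cs (k : Int) = some ' ' :=
        ⟨by omega, hget⟩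
      rw [if_pos hcond]
      rw [show (k : Int) + 1 = ((k + 1 : Nat) : Int) by push_cast; ring]
      rw [ih (k + 1) hk1]
      have hts : List.takeWhile (· == ' ') (' ' :: t) = ' ' :: List.takeWhile (· == ' ') t := by
        simp
      rw [hts]
      simp only [List.length_cons]
      push_cast
      ring
    · have hcond : ¬((k : Int) ≤ (cs.length : Int) - 1 ∧ PySem.List.pyGet? cs (k : Int) = some ' ') := by
        rintro ⟨-, h2⟩
        rw [hget] at h2
        exact hc (Option.some.inj h2)
      rw [if_neg hcond]
      have hts : List.takeWhile (· == ' ') (c :: t) = [] := by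
        simp [hc]
      rw [hts]
      simp

theorem pv_skipR_eq (cs : List Char) (p1 : Int) (h0 : 0 ≤ p1)
    (hp : PySem.List.pyGet? cs p1 ≠ some ' ') :
    ∀ (d : List Char) (j : Nat), j ≤ cs.length → (cs.take j).reverse = d → p1 < (j : Int) →
      pvSkipR cs p1 ((j : Int) - 1)
        = (j : Int) - 1 - ((d.takeWhile (· == ' ')).length : Int) := by
  intro d
  induction d with
  | nil =>
    intro j hj hd hlt
    exfalso
    have h1 : cs.take j = [] := by simpa using congrArg List.reverse hd
    have h2 : (cs.take j).length = j := List.length_take_of_le hj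
    rw [h1] at h2
    simp at h2
    omega
  | cons c t ih =>
    intro j hj hd hlt
    have hj0 : 0 < j := by
      by_contra h
      have hj' : j = 0 := by omega
      subst hj'
      simp at hd
    have hlenj : (cs.take j).length = j := List.length_take_of_le hj
    have htj : cs.take j = t.reverse ++ [c] := by
      have h1 := congrArg List.reverse hd
      simp at h1
      exact h1
    have hltr : t.reverse.length = j - 1 := by
      have h1 := congrArg List.length htj
      rw [hlenj] at h1
      simp at h1
      rw [List.length_reverse]
      omega
    have hgetc : PySem.List.pyGet? cs ((j : Int) - 1) = some c := by
      rw [show (j : Int) - 1 = ((j - 1 : Nat) : Int) by omega, PySem.List.pyGet?_natCast]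
      have h1 : (cs.take j)[j - 1]? = some c := by
        rw [htj, List.getElem?_append_right (by omega), hltr]
        simp
      rwa [List.getElem?_take_of_lt (by omega)] at h1
    rw [pvSkipR]
    by_cases hc : c = ' '
    · subst hc
      have hne : p1 ≠ (j : Int) - 1 := by
        intro he
        rw [← he] at hgetc
        exact hp hgetc
      have hcond : p1 ≤ (j : Int) - 1 ∧ PySem.List.pyGet? cs ((j : Int) - 1) = some ' ' :=
        ⟨by omega, hgetc⟩
      rw [if_pos hcond]
      have htake : cs.take (j - 1) = t.reverse := by
        have h1 : cs.take (j - 1) = (cs.take j).take (j - 1) := by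
          rw [List.take_take]
          congr 1
          omega
        rw [h1, htj, List.take_append_of_le_length (by omega)]
        exact List.take_of_length_le (by omega)
      have hrev : (cs.take (j - 1)).reverse = t := by rw [htake]; simp
      have hrec := ih (j - 1) (by omega) hrev (by omega)
      rw [show (j : Int) - 1 - 1 = ((j - 1 : Nat) : Int) - 1 by omega, hrec]
      have hts : List.takeWhile (· == ' ') (' ' :: t) = ' ' :: List.takeWhile (· == ' ') t := by
        simp
      rw [hts]
      simp only [List.length_cons]
      push_cast
      omega
    · have hcond : ¬(p1 ≤ (j : Int) - 1 ∧ PySem.List.pyGet? cs ((j : Int) - 1) = some ' ') := by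
        rintro ⟨-, h2⟩
        rw [hgetc] at h2
        exact hc (Option.some.inj h2)
      rw [if_neg hcond]
      have hts : List.takeWhile (· == ' ') (c :: t) = [] := by
        simp [hc]
      rw [hts]
      simp

theorem pv_collect_eq (cs : List Char) :
    ∀ (m : List Char) (k : Nat) (res : List Char),
      (cs.drop k).take m.length = m → k + m.length ≤ cs.length →
      pvCollect cs (k : Int) ((k : Int) + (m.length : Int) - 1) res = pvSqueezeAux m res := by
  intro m
  induction m with
  | nil =>
    intro k res _ _
    rw [pvCollect]
    simp [pvSqueezeAux]
  | cons c t ih =>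
    intro k res hm hlen
    have hklen : k < cs.length := by simp at hlen; omega
    have hdk : ∃ rest, cs.drop k = c :: rest ∧ rest.take t.length = t := by
      rcases e : cs.drop k with _ | ⟨c', rest⟩
      · rw [e] at hm; simp at hm
      · rw [e] at hm
        simp only [List.length_cons, List.take_succ_cons, List.cons.injEq] at hm
        exact ⟨rest, by rw [hm.1], hm.2⟩
    obtain ⟨rest, hdk, hrest⟩ := hdk
    have hget : PySem.List.pyGet? cs (k : Int) = some c := by
      rw [PySem.List.pyGet?_natCast]
      have h0 : (cs.drop k)[0]? = some c := by rw [hdk]; rfl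
      rwa [List.getElem?_drop, Nat.add_zero] at h0
    have hdk1 : cs.drop (k + 1) = rest := by
      rw [← List.drop_drop, hdk]; rfl
    rw [pvCollect]
    have hcond : (k : Int) ≤ (k : Int) + (((c :: t).length : Nat) : Int) - 1 := by
      simp only [List.length_cons]
      push_cast
      omega
    rw [if_pos hcond, hget]
    rw [show (k : Int) + 1 = ((k + 1 : Nat) : Int) by push_cast; ring]
    rw [show (k : Int) + (((c :: t).length : Nat) : Int) - 1
        = ((k + 1 : Nat) : Int) + ((t.length : Nat) : Int) - 1 by
      simp only [List.length_cons]; push_cast; ring]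
    rw [ih (k + 1) _ (by rw [hdk1]; exact hrest) (by simp only [List.length_cons] at hlen; omega)]
    simp [pvSqueezeAux]

theorem pv_squeezeAux_eq (m : List Char) :
    ∀ res : List Char,
      pvSqueezeAux m res
        = res ++ pvSqueezeF m (decide ((PySem.List.pyGet? res (-1)).getD ' ' ≠ ' ')) := by
  induction m with
  | nil => intro res; simp [pvSqueezeAux, pvSqueezeF]
  | cons c t ih =>
    intro res
    by_cases hc : c = ' '
    · subst hc
      by_cases hb : (PySem.List.pyGet? res (-1)).getD ' ' ≠ ' '
      · simp only [pvSqueezeAux, pvSqueezeF, if_neg (by simp : ¬(' ' ≠ ' ')), if_pos hb,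
          decide_eq_true hb, if_true]
        rw [ih (res ++ [' ']), pv_pyGet?_concat_neg_one]
        simp
      · simp only [pvSqueezeAux, pvSqueezeF, if_neg (by simp : ¬(' ' ≠ ' ')), if_neg hb]
        rw [ih res]
        rw [show decide ((PySem.List.pyGet? res (-1)).getD ' ' ≠ ' ') = false by simpa using hb]
        simp
    · simp only [pvSqueezeAux, pvSqueezeF, if_pos hc]
      rw [ih (res ++ [c]), pv_pyGet?_concat_neg_one]
      simp [hc]

theorem pv_words_all_space (u : List Char) (h : ∀ c ∈ u, c = ' ') : pvWords u = [] := by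
  induction u with
  | nil => simp [pvWords]
  | cons c t ih =>
    rw [pvWords, if_pos (h c (by simp))]
    exact ih (fun x hx => h x (by simp [hx]))

theorem pv_words_ne_nil (u : List Char) (hne : u ≠ []) (hl : u.getLast? ≠ some ' ') :
    pvWords u ≠ [] := by
  induction u with
  | nil => exact absurd rfl hne
  | cons c t ih =>
    rw [pvWords]
    by_cases hc : c = ' '
    · rw [if_pos hc]
      have ht : t ≠ [] := by
        rintro rfl
        subst hc
        simp at hl
      exact ih ht (by rwa [pv_getLast?_cons c t ht] at hl)
    · rw [if_neg hc]
      simp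

theorem pv_squeezeF_split (t : List Char) :
    pvSqueezeF t true = t.takeWhile pvNS ++ pvSqueezeF (t.dropWhile pvNS) true := by
  induction t with
  | nil => simp [pvSqueezeF]
  | cons c u ih =>
    by_cases hc : c = ' '
    · subst hc
      simp [pvNS_space, pvSqueezeF]
    · rw [show pvSqueezeF (c :: u) true = c :: pvSqueezeF u true by simp [pvSqueezeF, hc]]
      rw [List.takeWhile_cons, List.dropWhile_cons, pvNS_true hc]
      simp only [if_true]
      rw [ih]
      simp

theorem pv_splitOnP_split (t : List Char) :
    List.splitOnP (· == ' ') t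
      = List.modifyHead (fun x => t.takeWhile pvNS ++ x)
          (List.splitOnP (· == ' ') (t.dropWhile pvNS)) := by
  induction t with
  | nil => simp [List.splitOnP_nil]
  | cons c u ih =>
    by_cases hc : c = ' '
    · subst hc
      rw [List.takeWhile_cons, List.dropWhile_cons]
      simp only [pvNS_space, Bool.false_eq_true, if_false]
      rw [pv_modifyHead_nil_append]
    · rw [List.splitOnP_cons, if_neg (by simpa using hc)]
      rw [ih, List.modifyHead_modifyHead]
      rw [List.takeWhile_cons, List.dropWhile_cons, pvNS_true hc]
      simp only [if_true]
      congr 1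

theorem pv_squeezeF_eq_intercalate_bnd (n : Nat) :
    ∀ m : List Char, m.length ≤ n → m.getLast? ≠ some ' ' →
      pvSqueezeF m false = List.intercalate [' '] (pvWords m) := by
  induction n with
  | zero =>
    intro m hm _
    have hm0 : m = [] := List.length_eq_zero_iff.mp (by omega)
    subst hm0
    simp [pvSqueezeF, pvWords, List.intercalate]
  | succ n ih =>
    intro m hm hl
    match m with
    | [] => simp [pvSqueezeF, pvWords, List.intercalate]
    | c :: t =>
      by_cases hc : c = ' '
      · subst hc
        have ht : t ≠ [] := by rintro rfl; simp at hl
        have hl' : t.getLast? ≠ some ' ' := by rwa [pv_getLast?_cons _ t ht] at hl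
        rw [show pvSqueezeF (' ' :: t) false = pvSqueezeF t false by simp [pvSqueezeF]]
        rw [show pvWords (' ' :: t) = pvWords t by rw [pvWords]; simp]
        exact ih t (by simp only [List.length_cons] at hm; omega) hl'
      · rw [show pvSqueezeF (c :: t) false = c :: pvSqueezeF t true by simp [pvSqueezeF, hc]]
        rw [pv_squeezeF_split t]
        rw [pvWords, if_neg hc]
        have htd : t.takeWhile pvNS ++ t.dropWhile pvNS = t := List.takeWhile_append_dropWhile
        rcases e : t.dropWhile pvNS with _ | ⟨d, u⟩
        · simp [pvSqueezeF, pvWords, List.intercalate]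
        · have hd : d = ' ' := pvNS_eq_false.mp (pv_dropWhile_head pvNS t d u e)
          subst hd
          have ht : t ≠ [] := by
            rintro rfl
            simp at e
          have hmt : (c :: t).getLast? = (' ' :: u).getLast? := by
            rw [pv_getLast?_cons c t ht]
            conv_lhs => rw [← htd, e]
            rw [List.getLast?_append]
            rcases hgu : (' ' :: u).getLast? with _ | x
            · exfalso
              have : (' ' :: u) ≠ [] := by simp
              rw [List.getLast?_eq_none_iff] at hgu
              exact this hgu
            · simp
          have hu : u ≠ [] := by
            rintro rfl
            rw [hmt] at hl
            simp at hl
          have hlu : u.getLast? ≠ some ' ' := by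
            rw [hmt, pv_getLast?_cons _ u hu] at hl
            exact hl
          have hulen : u.length ≤ n := by
            have h1 := List.length_dropWhile_le pvNS t
            rw [e] at h1
            simp only [List.length_cons] at h1 hm
            omega
          have hrec := ih u hulen hlu
          have hwne := pv_words_ne_nil u hu hlu
          obtain ⟨w1, ws, hws⟩ := List.exists_cons_of_ne_nil hwne
          rw [show pvWords (' ' :: u) = pvWords u by rw [pvWords]; simp]
          rw [show pvSqueezeF (' ' :: u) true = ' ' :: pvSqueezeF u false by simp [pvSqueezeF]]
          rw [hrec, hws, pv_intercalate_cons₂]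
          simp

theorem pv_squeezeF_eq_intercalate (m : List Char) (hl : m.getLast? ≠ some ' ') :
    pvSqueezeF m false = List.intercalate [' '] (pvWords m) :=
  pv_squeezeF_eq_intercalate_bnd m.length m le_rfl hl

theorem pv_words_append_spaces_bnd (n : Nat) :
    ∀ x r : List Char, x.length ≤ n → (∀ c ∈ r, c = ' ') →
      pvWords (x ++ r) = pvWords x := by
  induction n with
  | zero =>
    intro x r hx hr
    have hx0 : x = [] := List.length_eq_zero_iff.mp (by omega)
    subst hx0
    rw [List.nil_append, pv_words_all_space r hr]
    simp [pvWords]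
  | succ n ih =>
    intro x r hx hr
    match x with
    | [] =>
      rw [List.nil_append, pv_words_all_space r hr]
      simp [pvWords]
    | c :: u =>
      by_cases hc : c = ' '
      · rw [List.cons_append, pvWords, if_pos hc]
        conv_rhs => rw [pvWords, if_pos hc]
        exact ih u r (by simp only [List.length_cons] at hx; omega) hr
      · rw [List.cons_append, pvWords, if_neg hc]
        conv_rhs => rw [pvWords, if_neg hc]
        have htd : u.takeWhile pvNS ++ u.dropWhile pvNS = u := List.takeWhile_append_dropWhile
        rcases e : u.dropWhile pvNS with _ | ⟨d, v⟩
        · -- u contains no space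
          have hueq : u.takeWhile pvNS = u := by
            conv_rhs => rw [← htd, e]
            simp
          have humem : ∀ y ∈ u, pvNS y = true := by
            intro y hy
            rw [← hueq] at hy
            exact List.mem_takeWhile_imp hy
          have htr : r.takeWhile pvNS = [] := by
            rcases r with _ | ⟨a, r'⟩
            · rfl
            · have ha : a = ' ' := hr a (by simp)
              subst ha
              simp [pvNS_space]
          have hdr : r.dropWhile pvNS = r := by
            rcases r with _ | ⟨a, r'⟩
            · rfl
            · have ha : a = ' ' := hr a (by simp)
              subst ha
              simp [pvNS_space]
          rw [pv_takeWhile_all pvNS u r humem, pv_dropWhile_all pvNS u r humem]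
          rw [htr, hdr, hueq, pv_words_all_space r hr]
          simp [pvWords]
        · obtain ⟨h1, h2⟩ := pv_takeWhile_append_stop pvNS u r (by rw [e]; simp)
          rw [h1, h2, e]
          have hvlen : (d :: v).length ≤ n := by
            have hle := List.length_dropWhile_le pvNS u
            rw [e] at hle
            simp only [List.length_cons] at hx hle ⊢
            omega
          rw [ih (d :: v) r hvlen hr]

theorem pv_words_append_spaces (x r : List Char) (hr : ∀ c ∈ r, c = ' ') :
    pvWords (x ++ r) = pvWords x :=
  pv_words_append_spaces_bnd x.length x r le_rfl hr

theorem pv_words_dropWhile (l : List Char) :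
    pvWords (l.dropWhile (· == ' ')) = pvWords l := by
  induction l with
  | nil => simp
  | cons c t ih =>
    rw [List.dropWhile_cons]
    by_cases hc : c = ' '
    · subst hc
      rw [if_pos (by simp)]
      rw [ih]
      rw [pvWords]
      simp
    · rw [if_neg (by simpa using hc)]

theorem pv_splitOn_go_eq (fuel : Nat) :
    ∀ (l cur : List Char) (accs : List (List Char)), l.length < fuel →
      PySem.Chars.splitOn.go [' '] fuel l cur accs
        = accs.reverse ++ (List.splitOnP (· == ' ') l).modifyHead (cur.reverse ++ ·) := by
  induction fuel with
  | zero => intro l cur accs h; omega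
  | succ fuel ih =>
    intro l cur accs h
    match l with
    | [] =>
      rw [PySem.Chars.splitOn.go]
      simp [List.splitOnP_nil]
      all_goals omega
    | c :: rest =>
      rw [PySem.Chars.splitOn.go]
      by_cases hc : c = ' '
      · subst hc
        have hpre : [' '].isPrefixOf (' ' :: rest) = true := by
          simp [List.isPrefixOf]
        simp only [hpre, if_true]
        rw [show List.drop [' '].length (' ' :: rest) = rest by simp]
        rw [ih rest [] (cur.reverse :: accs) (by simp only [List.length_cons] at h; omega)]
        rw [List.splitOnP_cons, if_pos (by simp)]
        simp
        exact pv_modifyHead_id _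
      · have hpre : [' '].isPrefixOf (c :: rest) = false := by
          simp [List.isPrefixOf]
          exact fun h => absurd h.symm hc
        simp only [hpre, Bool.false_eq_true, if_false]
        rw [ih rest (c :: cur) accs (by simp only [List.length_cons] at h; omega)]
        rw [List.splitOnP_cons, if_neg (by simpa using hc)]
        rw [List.modifyHead_modifyHead]
        congr 2
        funext x
        simp

theorem pv_splitOn_eq (cs : List Char) :
    PySem.Chars.splitOn cs [' '] = List.splitOnP (· == ' ') cs := by
  rw [PySem.Chars.splitOn]
  rw [pv_splitOn_go_eq (cs.length + 1) cs [] [] (by omega)]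
  simp only [List.reverse_nil, List.nil_append]
  exact pv_modifyHead_nil_append _

theorem pv_filter_splitOnP_bnd (n : Nat) :
    ∀ cs : List Char, cs.length ≤ n →
      (List.splitOnP (· == ' ') cs).filter (fun w => !w.isEmpty) = pvWords cs := by
  induction n with
  | zero =>
    intro cs h
    have h0 : cs = [] := List.length_eq_zero_iff.mp (by omega)
    subst h0
    simp [List.splitOnP_nil, pvWords]
  | succ n ih =>
    intro cs h
    match cs with
    | [] => simp [List.splitOnP_nil, pvWords]
    | c :: t =>
      by_cases hc : c = ' '
      · subst hc
        rw [List.splitOnP_cons, if_pos (by simp)]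
        rw [pvWords, if_pos rfl]
        rw [List.filter_cons]
        simp only [List.isEmpty_nil, Bool.not_true, Bool.false_eq_true, if_false]
        exact ih t (by simp only [List.length_cons] at h; omega)
      · rw [List.splitOnP_cons, if_neg (by simpa using hc)]
        rw [pvWords, if_neg hc]
        rw [pv_splitOnP_split t, List.modifyHead_modifyHead]
        rcases e : t.dropWhile pvNS with _ | ⟨d, u⟩
        · rw [List.splitOnP_nil]
          simp [pvWords]
        · have hd : d = ' ' := pvNS_eq_false.mp (pv_dropWhile_head pvNS t d u e)
          subst hd
          rw [List.splitOnP_cons, if_pos (by simp)]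
          simp only [List.modifyHead_cons, Function.comp]
          rw [show pvWords (' ' :: u) = pvWords u by rw [pvWords]; simp]
          have hulen : u.length ≤ n := by
            have h1 := List.length_dropWhile_le pvNS t
            rw [e] at h1
            simp only [List.length_cons] at h h1
            omega
          rw [List.filter_cons]
          simp only [List.isEmpty_cons, Bool.not_false, if_true]
          rw [ih u hulen]
          simp

theorem pv_filter_splitOnP (cs : List Char) :
    (List.splitOnP (· == ' ') cs).filter (fun w => !w.isEmpty) = pvWords cs :=
  pv_filter_splitOnP_bnd cs.length cs le_rfl

-- ===== VERDICT (by name: the statement is the Claim_ definition above) =====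
theorem trim_spaces_str_to_list_spec : Claim_equal_trim_spaces_str_to_list := by
  intro s _
  unfold Spec_trim_spaces_str_to_list trim_spaces_str_to_list trim_spaces_str_to_list_alt
  dsimp only
  rw [pv_splitOn_eq, pv_filter_splitOnP]
  rw [show PySem.Chars.join [' '] (pvWords s.toList)
      = List.intercalate [' '] (pvWords s.toList) from rfl]
  congr 1
  set cs := s.toList with hcs
  have hskipL : pvSkipL cs 0 ((cs.length : Int) - 1)
      = (((cs.takeWhile (· == ' ')).length : Nat) : Int) := by
    have h1 := pv_skipL_eq cs cs 0 rfl
    simpa using h1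
  rw [hskipL]
  set a := (cs.takeWhile (· == ' ')).length with ha
  have hale : a ≤ cs.length := by
    rw [ha]
    exact List.IsPrefix.length_le (List.takeWhile_prefix _)
  by_cases hall : a = cs.length
  · -- all spaces (also covers the empty string)
    have hcseq : cs.takeWhile (· == ' ') = cs :=
      List.IsPrefix.eq_of_length (List.takeWhile_prefix _) hall
    have hallsp : ∀ c ∈ cs, c = ' ' := by
      intro c hcmem
      rw [← hcseq] at hcmem
      simpa using List.mem_takeWhile_imp hcmem
    rw [pv_words_all_space cs hallsp]
    rw [pvSkipR, if_neg (by rintro ⟨h1, -⟩; omega)]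
    rw [pvCollect, if_neg (by omega)]
    simp [List.intercalate]
  · have haltn : a < cs.length := lt_of_le_of_ne hale hall
    have hmid : cs.drop a = cs.dropWhile (· == ' ') := by
      conv_lhs => rw [← List.takeWhile_append_dropWhile (p := (· == ' ')) (l := cs)]
      exact List.drop_left' ha.symm
    have hmidne : cs.dropWhile (· == ' ') ≠ [] := by
      intro hnil
      have h1 := congrArg List.length (List.takeWhile_append_dropWhile (p := (· == ' ')) (l := cs))
      rw [hnil] at h1
      simp only [List.append_nil] at h1
      rw [← ha] at *
      omega
    obtain ⟨c0, u0, hmide⟩ := List.exists_cons_of_ne_nil hmidne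
    have hc0ne : c0 ≠ ' ' := by
      have h1 := pv_dropWhile_head (· == ' ') cs c0 u0 hmide
      simpa using h1
    have hget0 : PySem.List.pyGet? cs (a : Int) = some c0 := by
      rw [PySem.List.pyGet?_natCast]
      have h0 : (cs.drop a)[0]? = some c0 := by rw [hmid, hmide]; rfl
      rwa [List.getElem?_drop, Nat.add_zero] at h0
    have hp : PySem.List.pyGet? cs (a : Int) ≠ some ' ' := by
      rw [hget0]
      intro h1
      exact hc0ne (Option.some.inj h1)
    set w := cs.reverse.takeWhile (· == ' ') with hw
    set dd := cs.reverse.dropWhile (· == ' ') with hdd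
    set t := w.length with hT
    have hskipR := pv_skipR_eq cs (a : Int) (by omega) hp cs.reverse cs.length le_rfl
      (by rw [List.take_length]) (by exact_mod_cast haltn)
    rw [hskipR]
    have hdecomp : cs = dd.reverse ++ w.reverse := by
      conv_lhs => rw [← List.reverse_reverse cs,
        ← List.takeWhile_append_dropWhile (p := (· == ' ')) (l := cs.reverse)]
      rw [List.reverse_append]
    have hwall : ∀ c ∈ w.reverse, c = ' ' := by
      intro c hcmem
      rw [List.mem_reverse] at hcmem
      simpa using List.mem_takeWhile_imp hcmem
    have hlens : cs.length = dd.length + t := by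
      have h1 := congrArg List.length hdecomp
      simpa using h1
    have htake : cs.take (cs.length - t) = dd.reverse := by
      conv_lhs => rw [hdecomp]
      exact List.take_left' (by simp; omega)
    have hrest : cs.drop (cs.length - t) = w.reverse := by
      conv_lhs => rw [hdecomp]
      exact List.drop_left' (by simp; omega)
    have hat : a + t < cs.length := by
      by_contra hge
      have h1 : (cs.drop (cs.length - t))[a - (cs.length - t)]? = some c0 := by
        rw [List.getElem?_drop, show cs.length - t + (a - (cs.length - t)) = a by omega]
        rw [← PySem.List.pyGet?_natCast]
        exact hget0
      rw [hrest] at h1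
      exact hc0ne (hwall c0 (List.mem_of_getElem? h1))
    set m := (cs.drop a).take (cs.length - t - a) with hm
    have hmlen : m.length = cs.length - t - a := by
      rw [hm]
      simp only [List.length_take, List.length_drop]
      omega
    have hwin : (cs.drop a).take m.length = m := by rw [hmlen]
    rw [show (cs.length : Int) - 1 - (t : Int) = (a : Int) + ((m.length : Nat) : Int) - 1 by
      rw [hmlen]; omega]
    rw [pv_collect_eq cs m a [] hwin (by rw [hmlen]; omega)]
    rw [pv_squeezeAux_eq m []]
    rw [show decide ((PySem.List.pyGet? ([] : List Char) (-1)).getD ' ' ≠ ' ') = false by decide]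
    rw [List.nil_append]
    have hmeq : m = dd.reverse.drop a := by
      rw [hm, ← htake, List.drop_take]
    have hmlast : m.getLast? ≠ some ' ' := by
      rw [hmeq, pv_getLast?_drop _ _ (by simp; omega)]
      rw [List.getLast?_eq_head?_reverse, List.reverse_reverse]
      obtain ⟨d0, v0, hdde⟩ : ∃ d0 v0, dd = d0 :: v0 := by
        rcases hdd0 : dd with _ | ⟨d0, v0⟩
        · exfalso
          rw [hdd0] at hlens
          simp at hlens
          omega
        · exact ⟨d0, v0, rfl⟩
      have hd0 : d0 ≠ ' ' := by
        have h1 := pv_dropWhile_head (· == ' ') cs.reverse d0 v0 (by rw [← hdd]; exact hdde)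
        simpa using h1
      rw [hdde]
      intro hcon
      simp at hcon
      exact hd0 hcon
    rw [pv_squeezeF_eq_intercalate m hmlast]
    congr 1
    have h2 : cs.dropWhile (· == ' ') = m ++ cs.drop (cs.length - t) := by
      rw [← hmid]
      conv_lhs => rw [← List.take_append_drop (cs.length - t - a) (cs.drop a)]
      rw [← hm, List.drop_drop,
        show a + (cs.length - t - a) = cs.length - t by omega]
    rw [← pv_words_dropWhile cs, h2, hrest]
    exact (pv_words_append_spaces m w.reverse hwall).symm
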